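-- pv_equiv track=rewrite | github.com/ramahii/BioInformatics- | L7/ex4.py | find_repetitions
-- ===== SOURCE A (Python) =====
-- def find_repetitions(sequence, min_length=6, max_length=10):
--     """Find all repetitions in a DNA sequence"""
--     repetitions = {}
--
--     for length in range(min_length, max_length + 1):
--         for i in range(len(sequence) - length + 1):
--             pattern = sequence[i:i + length]
--             if pattern in repetitions:
--                 repetitions[pattern] += 1
--             else:
--                 repetitions[pattern] = 1
--
--     # Keep only patterns that appear more than once
--     repetitions = {pattern: count for pattern, count in repetitions.items() if count > 1}
--
--     return repetitions
-- ===== SOURCE B (Python) =====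
-- def find_repetitions(sequence, min_length=6, max_length=10):
--     """Find all repetitions in a DNA sequence"""
--     subs = [sequence[i:i + length]
--             for length in range(min_length, max_length + 1)
--             for i in range(len(sequence) - length + 1)]
--     # count occurrences by sorting and run-length grouping (equal strings are adjacent)
--     counts = {}
--     current = None
--     run = 0
--     for p in sorted(subs):
--         if p == current:
--             run += 1
--         else:
--             if current is not None:
--                 counts[current] = run
--             current = p
--             run = 1
--     if current is not None:
--         counts[current] = run
--     # emit repeated patterns in first-appearance order (A's dict insertion order)
--     result = {}
--     for p in subs:
--         if p not in result and counts[p] > 1: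
--             result[p] = counts[p]
--     return result
-- ===== Notes on version B (the rewrite author's own statement) =====
-- stated objective: alternative
-- what changed: Replaces A's incrementally-updated hash-map counter with a sort of the flat substring list followed by a single run-length grouping pass to obtain counts, then one dedup pass over the original substring order to emit repeated patterns.
import Mathlib
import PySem

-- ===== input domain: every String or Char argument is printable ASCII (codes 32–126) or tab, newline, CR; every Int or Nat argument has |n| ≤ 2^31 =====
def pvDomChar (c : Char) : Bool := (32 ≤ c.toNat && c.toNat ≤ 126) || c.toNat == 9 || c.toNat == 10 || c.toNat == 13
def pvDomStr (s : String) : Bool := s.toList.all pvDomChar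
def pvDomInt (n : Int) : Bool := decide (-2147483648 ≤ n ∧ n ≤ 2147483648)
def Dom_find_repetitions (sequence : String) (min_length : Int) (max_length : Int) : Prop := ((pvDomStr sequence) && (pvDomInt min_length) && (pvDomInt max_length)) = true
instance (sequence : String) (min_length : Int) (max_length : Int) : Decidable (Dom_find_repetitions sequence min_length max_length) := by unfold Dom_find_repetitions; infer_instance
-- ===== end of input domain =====

-- B counts substrings by sorting the flat substring list and run-length grouping the sorted
-- list, then emits repeated patterns in first-seen order (alternative algorithm; not faster).


-- ===== PORT A =====
-- literal transliteration of A: one dict threaded through both loops, then the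
-- `{p: c for p, c in items if c > 1}` comprehension (keys of .items() are distinct,
-- so the rebuilt dict's items are exactly the filtered items list).
def find_repetitions (sequence : String) (min_length : Int) (max_length : Int) : List (String × Int) :=
  let reps : PySem.Dict String Int :=
    (PySem.List.pyRange min_length (max_length + 1) 1).foldl (fun reps length =>
      (PySem.List.pyRange 0 (PySem.Str.len sequence - length + 1) 1).foldl (fun reps i =>
        let pattern := PySem.Str.slice sequence (some i) (some (i + length))
        if reps.contains pattern then reps.insert pattern (reps.getD pattern 0 + 1)
        else reps.insert pattern 1) reps) PySem.Dict.empty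
  reps.items.filter (fun pc => pc.2 > 1)

-- ===== PORT B =====
-- literal transliteration of B: flat substring list; sorted(subs) walked once with
-- (current, run, counts) state, final run flushed after the loop; then the emission
-- loop over subs in original order ('if p not in result and counts[p] > 1').
-- counts[p] is ported as counts.getD p 0: exact, since every p drawn from subs is a
-- key of counts (no KeyError is reachable).
def find_repetitions_alt (sequence : String) (min_length : Int) (max_length : Int) : List (String × Int) :=
  let subs : List String :=
    (PySem.List.pyRange min_length (max_length + 1) 1).flatMap (fun length =>
      (PySem.List.pyRange 0 (PySem.Str.len sequence - length + 1) 1).map (fun i =>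
        PySem.Str.slice sequence (some i) (some (i + length))))
  let st :=
    (PySem.List.sorted subs (fun x => x) false).foldl (fun s p =>
        if some p == s.1 then (s.1, s.2.1 + 1, s.2.2)
        else (some p, (1 : Int),
          match s.1 with
          | none => s.2.2
          | some c => s.2.2.insert c s.2.1))
      ((none : Option String), (0 : Int), (PySem.Dict.empty : PySem.Dict String Int))
  let counts : PySem.Dict String Int :=
    match st.1 with
    | none => st.2.2
    | some c => st.2.2.insert c st.2.1
  (subs.foldl (fun d p =>
      if d.contains p then d
      else if counts.getD p 0 > 1 then d.insert p (counts.getD p 0) else d)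
    PySem.Dict.empty).items

-- ===== PRECONDITION & SPEC =====
def Spec_find_repetitions (sequence : String) (min_length : Int) (max_length : Int) (out : List (String × Int)) : Prop := out = find_repetitions_alt sequence min_length max_length
instance (sequence : String) (min_length : Int) (max_length : Int) (out : List (String × Int)) : Decidable (Spec_find_repetitions sequence min_length max_length out) := by unfold Spec_find_repetitions; infer_instance

-- ===== CLAIM (what is proved, stated in full; the proofs are below) =====
def Claim_equal_find_repetitions : Prop := ∀ (sequence : String) (min_length : Int) (max_length : Int), Dom_find_repetitions sequence min_length max_length → Spec_find_repetitions sequence min_length max_length (find_repetitions sequence min_length max_length)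

-- ===== LEMMAS AND PROOFS =====

-- the flat substring list both programs traverse (proof-only abbreviation)
def pvSubs (sequence : String) (min_length : Int) (max_length : Int) : List String :=
  (PySem.List.pyRange min_length (max_length + 1) 1).flatMap (fun length =>
    (PySem.List.pyRange 0 (PySem.Str.len sequence - length + 1) 1).map (fun i =>
      PySem.Str.slice sequence (some i) (some (i + length))))

-- B's run-length step and final flush, named for the proofs (definitionally the port's lambdas)
def rlStep (s : Option String × Int × PySem.Dict String Int) (p : String) :
    Option String × Int × PySem.Dict String Int :=
  if some p == s.1 then (s.1, s.2.1 + 1, s.2.2)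
  else (some p, (1 : Int),
    match s.1 with
    | none => s.2.2
    | some c => s.2.2.insert c s.2.1)

def rlFlush (s : Option String × Int × PySem.Dict String Int) : PySem.Dict String Int :=
  match s.1 with
  | none => s.2.2
  | some c => s.2.2.insert c s.2.1

theorem alt_eq (sequence : String) (min_length max_length : Int) :
    find_repetitions_alt sequence min_length max_length
      = ((pvSubs sequence min_length max_length).foldl (fun d p =>
          if d.contains p then d
          else if (rlFlush ((PySem.List.sorted (pvSubs sequence min_length max_length)
              (fun x => x) false).foldl rlStep
              ((none : Option String), (0 : Int), (PySem.Dict.empty : PySem.Dict String Int)))).getD p 0 > 1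
          then d.insert p ((rlFlush ((PySem.List.sorted (pvSubs sequence min_length max_length)
              (fun x => x) false).foldl rlStep
              ((none : Option String), (0 : Int), (PySem.Dict.empty : PySem.Dict String Int)))).getD p 0)
          else d)
        PySem.Dict.empty).items := rfl

theorem a_eq (sequence : String) (min_length max_length : Int) :
    find_repetitions sequence min_length max_length
      = ((PySem.List.pyRange min_length (max_length + 1) 1).foldl (fun reps length =>
          (PySem.List.pyRange 0 (PySem.Str.len sequence - length + 1) 1).foldl (fun reps i =>
            let pattern := PySem.Str.slice sequence (some i) (some (i + length))
            if reps.contains pattern then reps.insert pattern (reps.getD pattern 0 + 1)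
            else reps.insert pattern 1) reps) PySem.Dict.empty).items.filter
          (fun pc => pc.2 > 1) := rfl

-- A's nested loops are one counting fold over the flat substring list
theorem A_counter (sequence : String) (min_length max_length : Int) :
    (PySem.List.pyRange min_length (max_length + 1) 1).foldl (fun reps length =>
        (PySem.List.pyRange 0 (PySem.Str.len sequence - length + 1) 1).foldl (fun reps i =>
          let pattern := PySem.Str.slice sequence (some i) (some (i + length))
          if reps.contains pattern then reps.insert pattern (reps.getD pattern 0 + 1)
          else reps.insert pattern 1) reps) PySem.Dict.empty
      = PySem.Dict.counter (pvSubs sequence min_length max_length) := by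
  rw [← PySem.Dict.foldl_insert_getD_add_one_eq_counter, pvSubs, List.flatMap_def,
    List.foldl_flatten, List.foldl_map]
  apply PySem.List.foldl_congr_mem
  intro d L _
  rw [List.foldl_map]
  apply PySem.List.foldl_congr_mem
  intro d' i _
  show (if d'.contains _ then _ else _) = _
  by_cases h : d'.contains (PySem.Str.slice sequence (some i) (some (i + L))) = true
  · rw [if_pos h]
  · have hc : d'.contains (PySem.Str.slice sequence (some i) (some (i + L))) = false := by
      simpa using h
    rw [if_neg (by simp [hc]), PySem.Dict.getD_of_not_contains _ _ hc, zero_add]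

-- run-length invariant: a fold over a sorted tail whose elements all dominate the
-- current run's key yields, for every key, its total count (fresh keys), the open
-- run's extension (the current key), or the stored value (finished keys)
theorem rl_main : ∀ (l : List String), l.Pairwise (· ≤ ·) →
    ∀ (c : String) (r : Int) (d : PySem.Dict String Int), (∀ x ∈ l, c ≤ x) →
    ∀ p, (rlFlush (l.foldl rlStep (some c, r, d))).getD p 0
      = if p = c then r + (l.count c : Int)
        else if l.count p ≠ 0 then (l.count p : Int) else d.getD p 0 := by
  intro l
  induction l with
  | nil =>
    intro _ c r d _ p
    simp only [List.foldl_nil, rlFlush, List.count_nil, Nat.cast_zero, add_zero]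
    rw [PySem.Dict.getD_insert]
    split_ifs with h1 h2
    · rfl
    · omega
    · rfl
  | cons x rest ih =>
    intro hpw c r d hc p
    have hxrest : ∀ y ∈ rest, x ≤ y := by
      intro y hy; exact (List.pairwise_cons.1 hpw).1 y hy
    have hpw' : rest.Pairwise (· ≤ ·) := (List.pairwise_cons.1 hpw).2
    have hcx : c ≤ x := hc x (by simp)
    rw [List.foldl_cons]
    by_cases hx : x = c
    · subst hx
      have hstep : rlStep (some x, r, d) x = (some x, r + 1, d) := by
        simp [rlStep]
      rw [hstep, ih hpw' x (r + 1) d hxrest p]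
      by_cases hp : p = x
      · subst hp; simp [List.count_cons_self]; ring
      · rw [if_neg hp, if_neg hp, List.count_cons_of_ne (Ne.symm hp)]
    · have hstep : rlStep (some c, r, d) x = (some x, 1, d.insert c r) := by
        have hb : (some x == (some c : Option String)) = false := by simp [hx]
        simp [rlStep, hb]
      have hcrest : c ∉ rest := by
        intro hmem
        exact hx (le_antisymm (hxrest c hmem) hcx)
      rw [hstep, ih hpw' x 1 (d.insert c r) hxrest p]
      by_cases hpx : p = x
      · subst hpx
        have hpc : p ≠ c := hx
        rw [if_neg hpc, List.count_cons_self, if_pos (by simp),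
          if_pos (by omega : (rest.count p + 1 : Nat) ≠ 0)]
        push_cast; ring
      · by_cases hpc : p = c
        · subst hpc
          have h0 : rest.count p = 0 := List.count_eq_zero.2 hcrest
          rw [if_neg hpx, if_pos rfl, if_neg (by simp [h0]),
            List.count_cons_of_ne (Ne.symm hpx), h0, PySem.Dict.getD_insert]
          simp
        · rw [if_neg hpx, if_neg hpc, List.count_cons_of_ne (Ne.symm hpx),
            PySem.Dict.getD_insert, if_neg hpc]

-- the counts dict built by B's run-length pass stores exactly the multiplicities
theorem counts_getD (subs : List String) (p : String) :
    (rlFlush ((PySem.List.sorted subs (fun x => x) false).foldl rlStep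
        ((none : Option String), (0 : Int), (PySem.Dict.empty : PySem.Dict String Int)))).getD p 0
      = (subs.count p : Int) := by
  have hperm : (PySem.List.sorted subs (fun x => x) false).Perm subs :=
    PySem.List.sorted_perm subs (fun x => x) false
  rw [← hperm.count_eq]
  rcases hsrt : PySem.List.sorted subs (fun x => x) false with _ | ⟨x, rest⟩
  · simp [rlFlush, PySem.Dict.getD_empty]
  · have hpw : (x :: rest).Pairwise (· ≤ ·) := by
      have := PySem.List.sorted_pairwise (xs := subs) (key := fun x => x)
      rw [hsrt] at this
      exact this
    have hstep : rlStep ((none : Option String), (0 : Int), PySem.Dict.empty) x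
        = (some x, 1, PySem.Dict.empty) := by simp [rlStep]
    rw [List.foldl_cons, hstep,
      rl_main rest (List.pairwise_cons.1 hpw).2 x 1 PySem.Dict.empty
        (fun y hy => (List.pairwise_cons.1 hpw).1 y hy) p]
    by_cases hp : p = x
    · subst hp; rw [if_pos rfl, List.count_cons_self]; push_cast; ring
    · rw [if_neg hp, List.count_cons_of_ne (Ne.symm hp)]
      by_cases h0 : rest.count p ≠ 0
      · rw [if_pos h0]
      · rw [if_neg h0, PySem.Dict.getD_empty]
        omega

-- set(xs) commutes with filtering
theorem ofList_filter {α : Type} [BEq α] [LawfulBEq α] (q : α → Bool) (l : List α) :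
    PySem.Set.ofList (l.filter q) = (PySem.Set.ofList l).filter q := by
  induction l with
  | nil => rfl
  | cons x xs ih =>
    by_cases hq : q x = true
    · simp only [List.filter_cons, hq, if_pos, PySem.Set.ofList_cons, ih,
        PySem.Set.discard, List.filter_filter]
      congr 1
      apply List.filter_congr
      intro y _
      rw [Bool.and_comm]
    · rw [List.filter_cons_of_neg (by simp [hq]), ih, PySem.Set.ofList_cons,
        List.filter_cons_of_neg (by simp [hq])]
      show List.filter q _ = List.filter q (List.filter (fun y => !(y == x)) _)
      rw [List.filter_filter]
      apply List.filter_congr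
      intro y _
      by_cases hqy : q y = true
      · have hyx : (y == x) = false := by
          have : y ≠ x := fun h => hq (h ▸ hqy)
          simp [this]
        simp [hqy, hyx]
      · simp [Bool.not_eq_true] at hqy
        simp [hqy]

-- B's emission loop: a guarded dedup-insert over keys (value a function of the key only)
-- appends exactly the fresh keys passing the guard
theorem items_fold_guard {v : String → Int} {q : String → Prop} [DecidablePred q] :
    ∀ (l s : List String), s.Nodup → (∀ a ∈ s, q a) →
      (l.foldl (fun d p => if d.contains p then d else if q p then d.insert p (v p) else d)
          (PySem.Dict.mk (s.map (fun p => (p, v p))))).items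
        = (PySem.Set.update s (l.filter (fun p => decide (q p)))).map (fun p => (p, v p)) := by
  intro l
  induction l with
  | nil => intro s _ _; rfl
  | cons p rest ih =>
    intro s hs hq
    simp only [List.foldl_cons, List.filter_cons]
    by_cases hp : p ∈ s
    · have hct : (PySem.Dict.mk (s.map (fun p => (p, v p)))).contains p = true := by
        simp [PySem.Dict.contains_mk]; exact hp
      rw [if_pos hct, if_pos (by simpa using hq p hp)]
      rw [show PySem.Set.update s (p :: List.filter (fun p => decide (q p)) rest)
          = PySem.Set.update (PySem.Set.add s p) (List.filter (fun p => decide (q p)) rest)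
        from rfl, PySem.Set.add_of_mem hp]
      exact ih s hs hq
    · have hct : (PySem.Dict.mk (s.map (fun p => (p, v p)))).contains p = false := by
        simp [PySem.Dict.contains_mk]
        intro a ha h; exact hp (h ▸ ha)
      rw [if_neg (by simp [hct])]
      by_cases hqp : q p
      · rw [if_pos hqp, if_pos (by simpa using hqp)]
        have hd : (PySem.Dict.mk (s.map (fun p => (p, v p)))).insert p (v p)
            = PySem.Dict.mk ((s ++ [p]).map (fun p => (p, v p))) := by
          apply PySem.Dict.ext
          rw [PySem.Dict.items_insert_of_not_contains _ _ hct]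
          simp
        have hnd : (s ++ [p]).Nodup := by
          simp [List.nodup_append, hs]
          intro a ha h; exact hp (h ▸ ha)
        have hq2 : ∀ a ∈ s ++ [p], q a := by
          intro a ha
          rcases List.mem_append.1 ha with h | h
          · exact hq a h
          · simp at h; exact h ▸ hqp
        rw [hd, show PySem.Set.update s (p :: List.filter (fun p => decide (q p)) rest)
            = PySem.Set.update (PySem.Set.add s p) (List.filter (fun p => decide (q p)) rest)
          from rfl, PySem.Set.add_of_not_mem hp]
        exact ih (s ++ [p]) hnd hq2
      · rw [if_neg hqp, if_neg (by simpa using hqp)]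
        exact ih s hs hq

-- ===== VERDICT (by name: the statement is the Claim_ definition above) =====
theorem find_repetitions_spec : Claim_equal_find_repetitions := by
  intro sequence min_length max_length _
  show _ = _
  rw [a_eq, alt_eq, A_counter]
  simp only [counts_getD]
  rw [show (PySem.Dict.empty : PySem.Dict String Int)
      = PySem.Dict.mk (([] : List String).map
          (fun p => (p, ((pvSubs sequence min_length max_length).count p : Int)))) from rfl]
  rw [items_fold_guard (v := fun p => ((pvSubs sequence min_length max_length).count p : Int))
      (q := fun p => ((pvSubs sequence min_length max_length).count p : Int) > 1)
      (pvSubs sequence min_length max_length) [] List.nodup_nil (by simp)]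
  rw [PySem.Set.update_nil_left, ofList_filter, PySem.Dict.items_counter, List.filter_map]
  rfl
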